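-- pv_equiv track=rewrite | github.com/jijyisme/senior-project-backend | aylien/thai_nlp_platform/utils/loader.py | split_tag
-- ===== SOURCE A (Python) =====
-- def split_tag(collection):
--     x_train = []
--     pos_y_train = []
--     ner_y_train = []
--     for i in range(len(collection)):
--         post = collection[i][0]
--         splitted_word_list = []
--         pos_list = []
--         ner_list = []
--         for j in range(len(post)):
--             word = post[j]
--             try:
--                 splitted_word, pos_tag, ner_tag = word.split('/')
--                 splitted_word_list.append(splitted_word)
--                 pos_list.append(pos_tag)
--                 ner_list.append(ner_tag)
--             except:
--                 continue
--         x_train.append(splitted_word_list)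
--         pos_y_train.append(pos_list)
--         ner_y_train.append(ner_list)
--     return x_train, pos_y_train, ner_y_train
-- ===== SOURCE B (Python) =====
-- def split_tag(collection):
--     def column(k):
--         return [[w.split('/')[k] for w in item[0] if len(w.split('/')) == 3]
--                 for item in collection]
--     return column(0), column(1), column(2)
-- ===== Notes on version B (the rewrite author's own statement) =====
-- stated objective: alternative
-- what changed: B makes three independent staged passes over the collection, one per output component, each extracting column k of the valid '/' splits, instead of A's single pass maintaining three parallel accumulators.
import Mathlib
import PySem

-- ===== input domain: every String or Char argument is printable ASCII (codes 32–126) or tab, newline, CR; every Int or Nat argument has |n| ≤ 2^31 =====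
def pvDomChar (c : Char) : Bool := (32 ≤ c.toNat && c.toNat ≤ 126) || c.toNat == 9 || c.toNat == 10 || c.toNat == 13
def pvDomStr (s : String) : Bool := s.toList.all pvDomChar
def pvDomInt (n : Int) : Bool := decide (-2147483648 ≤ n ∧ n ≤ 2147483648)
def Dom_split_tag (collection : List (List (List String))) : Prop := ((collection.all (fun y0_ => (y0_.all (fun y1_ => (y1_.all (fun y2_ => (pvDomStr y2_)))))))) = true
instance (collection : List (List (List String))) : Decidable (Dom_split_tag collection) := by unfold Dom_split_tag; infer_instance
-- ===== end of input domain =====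

-- B computes the three output components in three independent staged passes (one column per pass) instead of A's single pass with three parallel accumulators; alternative decomposition, same cost.


-- ===== PORT A =====
def split_tag (collection : List (List (List String))) : List (List String) × List (List String) × List (List String) :=
  collection.foldl
    (fun acc ci =>
      let post := (PySem.List.pyGet? ci 0).getD []   -- collection[i][0]; Pre_ excludes the none (IndexError) case
      let r := post.foldl
        (fun (acc2 : List String × List String × List String) word =>
          match PySem.Str.split? word "/" with      -- word.split('/'); try 3-unpack, except: continue
          | some [a, b, c] => (acc2.1 ++ [a], acc2.2.1 ++ [b], acc2.2.2 ++ [c])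
          | _ => acc2)
        ([], [], [])
      (acc.1 ++ [r.1], acc.2.1 ++ [r.2.1], acc.2.2 ++ [r.2.2]))
    ([], [], [])

-- ===== PORT B =====
-- one staged pass: [[w.split('/')[k] for w in item[0] if len(w.split('/')) == 3] for item in collection]
def stColumn (collection : List (List (List String))) (k : Int) : List (List String) :=
  collection.map (fun item =>
    ((((PySem.List.pyGet? item 0).getD []).filter    -- item[0]; Pre_ excludes the none (IndexError) case
        (fun w => ((PySem.Str.split? w "/").getD []).length == 3)).map
      (fun w => (PySem.List.pyGet? ((PySem.Str.split? w "/").getD []) k).getD "")))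
      -- the filter guarantees length 3 and k ∈ {0,1,2}, so the pyGet? never misses

def split_tag_alt (collection : List (List (List String))) : List (List String) × List (List String) × List (List String) :=
  (stColumn collection 0, stColumn collection 1, stColumn collection 2)

-- ===== PRECONDITION & SPEC =====
-- Pre_ excludes exactly the inputs where A raises: an empty collection[i] (collection[i][0] IndexError).
def Pre_split_tag (collection : List (List (List String))) : Prop :=
  ∀ ci ∈ collection, ci ≠ []
instance (collection : List (List (List String))) : Decidable (Pre_split_tag collection) := by unfold Pre_split_tag; infer_instance
def pvWitness_split_tag : List (List (List String)) := [[["a/b/c", "x"]], [["d/e/f"], ["g"]]]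

def Spec_split_tag (collection : List (List (List String))) (out : List (List String) × List (List String) × List (List String)) : Prop := out = split_tag_alt collection
instance (collection : List (List (List String))) (out : List (List String) × List (List String) × List (List String)) : Decidable (Spec_split_tag collection out) := by unfold Spec_split_tag; infer_instance

-- ===== CLAIM (what is proved, stated in full; the proofs are below) =====
def Claim_equal_split_tag : Prop := ∀ (collection : List (List (List String))), Dom_split_tag collection → Pre_split_tag collection → Spec_split_tag collection (split_tag collection)

-- ===== LEMMAS AND PROOFS =====

-- per-post column of B, for the inner-loop lemma
def postCols (post : List String) (k : Int) : List String :=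
  ((post.filter (fun w => ((PySem.Str.split? w "/").getD []).length == 3)).map
    (fun w => (PySem.List.pyGet? ((PySem.Str.split? w "/").getD []) k).getD ""))

-- A's inner loop with three parallel accumulators computes B's three columns of the post
theorem inner_eq (post : List String) (a b c : List String) :
    post.foldl
      (fun (acc2 : List String × List String × List String) word =>
        match PySem.Str.split? word "/" with
        | some [x, y, z] => (acc2.1 ++ [x], acc2.2.1 ++ [y], acc2.2.2 ++ [z])
        | _ => acc2)
      (a, b, c)
    = (a ++ postCols post 0, b ++ postCols post 1, c ++ postCols post 2) := by
  induction post generalizing a b c with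
  | nil => simp [postCols]
  | cons w ws ih =>
    simp only [List.foldl_cons]
    cases h : PySem.Str.split? w "/" with
    | none => simp [postCols, h, ih]
    | some l =>
      match l with
      | [] => simp [postCols, h, ih]
      | [x] => simp [postCols, h, ih]
      | [x, y] => simp [postCols, h, ih]
      | [x, y, z] =>
        simp [postCols, h, ih, PySem.List.pyGet?, PySem.List.pyIdx?]
      | x :: y :: z :: u :: t => simp [postCols, h, ih]

-- A's outer fold equals B's three staged maps, for any accumulator
theorem outer_eq (collection : List (List (List String))) (a b c : List (List String)) :
    collection.foldl
      (fun acc ci =>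
        let post := (PySem.List.pyGet? ci 0).getD []
        let r := post.foldl
          (fun (acc2 : List String × List String × List String) word =>
            match PySem.Str.split? word "/" with
            | some [x, y, z] => (acc2.1 ++ [x], acc2.2.1 ++ [y], acc2.2.2 ++ [z])
            | _ => acc2)
          ([], [], [])
        (acc.1 ++ [r.1], acc.2.1 ++ [r.2.1], acc.2.2 ++ [r.2.2]))
      (a, b, c)
    = (a ++ stColumn collection 0, b ++ stColumn collection 1, c ++ stColumn collection 2) := by
  induction collection generalizing a b c with
  | nil => simp [stColumn]
  | cons ci rest ih =>
    simp only [List.foldl_cons]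
    rw [inner_eq]
    simp [ih, stColumn, postCols]

-- ===== VERDICT (by name: the statement is the Claim_ definition above) =====
theorem split_tag_spec : Claim_equal_split_tag := by
  intro collection _ _
  unfold Spec_split_tag split_tag split_tag_alt
  simpa using outer_eq collection [] [] []
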